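-- pv_equiv track=rewrite | github.com/1zhangying/CKGFuzzer-1 | fuzzing_llm_engine/crash/debugger.py | _parse_frame_vars
-- ===== SOURCE A (Python) =====
-- from typing import Any, Dict, List, Optional, Tuple
--
-- def _parse_frame_vars(frame_text: str) -> Tuple[Dict[str, str], Dict[str, str]]:
--     args = {}
--     locals_ = {}
--     if not frame_text:
--         return args, locals_
--
--     current = None
--     for line in frame_text.split("\n"):
--         stripped = line.strip()
--         if "---ARGS---" in stripped:
--             current = "args"
--             continue
--         if "---LOCALS---" in stripped:
--             current = "locals"
--             continue
--         if not stripped or stripped.startswith("No "):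
--             continue
--
--         if " = " in stripped:
--             key, _, val = stripped.partition(" = ")
--             key = key.strip()
--             val = val.strip()
--             if current == "args":
--                 args[key] = val[:200]
--             elif current == "locals":
--                 locals_[key] = val[:200]
--
--     return args, locals_
-- ===== SOURCE B (Python) =====
-- # B: two-phase decomposition — first group stripped lines into tagged marker
-- # sections, then parse each section's assignments and merge them in order.
-- def _parse_assignments(lines):
--     pairs = []
--     for s in lines:
--         if not s or s.startswith("No "):
--             continue
--         if " = " in s:
--             k, _, v = s.partition(" = ")
--             pairs.append((k.strip(), v.strip()[:200]))
--     return pairs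
--
-- def _parse_frame_vars(frame_text):
--     segments = []  # list of (tag, [stripped lines]) in encounter order
--     for line in frame_text.split("\n"):
--         s = line.strip()
--         if "---ARGS---" in s:
--             segments.append(("args", []))
--         elif "---LOCALS---" in s:
--             segments.append(("locals", []))
--         elif segments:
--             segments[-1][1].append(s)
--     args, locals_ = {}, {}
--     for tag, lines in segments:
--         (args if tag == "args" else locals_).update(_parse_assignments(lines))
--     return args, locals_
-- ===== Notes on version B (the rewrite author's own statement) =====
-- stated objective: alternative
-- what changed: A's single state-machine loop (current-section flag consulted per line) is replaced by a two-phase decomposition: first group stripped lines into tagged marker sections, then parse each section's assignments into (key, value) pairs and merge them into the dicts in section order via dict.update.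
import Mathlib
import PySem

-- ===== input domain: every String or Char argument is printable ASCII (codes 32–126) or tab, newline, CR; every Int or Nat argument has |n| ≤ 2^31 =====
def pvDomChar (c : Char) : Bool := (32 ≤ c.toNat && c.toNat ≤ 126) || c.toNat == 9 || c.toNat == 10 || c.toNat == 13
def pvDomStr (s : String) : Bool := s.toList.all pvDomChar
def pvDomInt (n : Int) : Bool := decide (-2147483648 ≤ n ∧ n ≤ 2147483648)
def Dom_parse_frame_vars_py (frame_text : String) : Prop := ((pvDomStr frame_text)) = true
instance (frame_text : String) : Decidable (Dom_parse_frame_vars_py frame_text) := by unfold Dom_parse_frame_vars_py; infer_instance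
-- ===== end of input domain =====

-- B replaces A's fused state-machine loop with a section-grouping pass followed by
-- per-section assignment parsing merged via dict updates (objective: alternative decomposition).

-- shared string constants
def pvArgsMark : List Char := ['-','-','-','A','R','G','S','-','-','-']
def pvLocalsMark : List Char := ['-','-','-','L','O','C','A','L','S','-','-','-']
def pvNoMark : List Char := ['N','o',' ']
def pvEqSep : List Char := [' ','=',' ']

-- ===== PORT A =====
-- one line of A's loop body; 'stripped = line.strip()' is written out at each use;
-- 'key, _, val = stripped.partition(" = ")' is ported via the index of the FIRST
-- occurrence of " = " (exact: the branch is guarded by '" = " in stripped').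
def pvStepA (st : PySem.Dict String String × PySem.Dict String String × Option String)
    (line : List Char) : PySem.Dict String String × PySem.Dict String String × Option String :=
  if PySem.Chars.isIn pvArgsMark (PySem.Chars.strip line) then (st.1, st.2.1, some "args")
  else if PySem.Chars.isIn pvLocalsMark (PySem.Chars.strip line) then (st.1, st.2.1, some "locals")
  else if (PySem.Chars.strip line).isEmpty
      || PySem.Chars.startswith (PySem.Chars.strip line) pvNoMark then st
  else if PySem.Chars.isIn pvEqSep (PySem.Chars.strip line) then
    let i := (PySem.Chars.find (PySem.Chars.strip line) pvEqSep).toNat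
    let key := String.ofList (PySem.Chars.strip ((PySem.Chars.strip line).take i))
    let val := String.ofList
      (PySem.List.slice (PySem.Chars.strip ((PySem.Chars.strip line).drop (i+3))) none (some 200))
    if st.2.2 == some "args" then (st.1.insert key val, st.2.1, st.2.2)
    else if st.2.2 == some "locals" then (st.1, st.2.1.insert key val, st.2.2)
    else st
  else st

def parse_frame_vars_py (frame_text : String) : (List (String × String)) × (List (String × String)) :=
  if frame_text == "" then ([], [])
  else
    let st := (PySem.Chars.splitOn frame_text.toList ['\n']).foldl pvStepA
      (PySem.Dict.empty, PySem.Dict.empty, none)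
    (st.1.items, st.2.1.items)

-- ===== PORT B =====
def pvParseAssignments (ls : List (List Char)) : List (String × String) :=
  ls.foldl (fun acc s =>
    if s.isEmpty || PySem.Chars.startswith s pvNoMark then acc
    else if PySem.Chars.isIn pvEqSep s then
      let i := (PySem.Chars.find s pvEqSep).toNat
      acc ++ [(String.ofList (PySem.Chars.strip (s.take i)),
               String.ofList (PySem.List.slice (PySem.Chars.strip (s.drop (i+3))) none (some 200)))]
    else acc) []

-- one line of B's grouping loop; 'segments[-1][1].append(s)' on a non-empty list
-- = rewrite the last entry ('s = line.strip()' written out at each use)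
def pvSegStep (segs : List (String × List (List Char))) (line : List Char) :
    List (String × List (List Char)) :=
  if PySem.Chars.isIn pvArgsMark (PySem.Chars.strip line) then segs ++ [("args", [])]
  else if PySem.Chars.isIn pvLocalsMark (PySem.Chars.strip line) then segs ++ [("locals", [])]
  else if segs.isEmpty then segs
  else segs.dropLast
    ++ [((segs.getLastD ("", [])).1, (segs.getLastD ("", [])).2 ++ [PySem.Chars.strip line])]

def parse_frame_vars_py_alt (frame_text : String) : (List (String × String)) × (List (String × String)) :=
  let segs := (PySem.Chars.splitOn frame_text.toList ['\n']).foldl pvSegStep []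
  let fin := segs.foldl
    (fun (al : PySem.Dict String String × PySem.Dict String String) seg =>
      if seg.1 == "args" then (al.1.update (pvParseAssignments seg.2), al.2)
      else (al.1, al.2.update (pvParseAssignments seg.2)))
    (PySem.Dict.empty, PySem.Dict.empty)
  (fin.1.items, fin.2.items)

-- ===== PRECONDITION & SPEC =====
def Spec_parse_frame_vars_py (frame_text : String) (out : (List (String × String)) × (List (String × String))) : Prop := out = parse_frame_vars_py_alt frame_text
instance (frame_text : String) (out : (List (String × String)) × (List (String × String))) : Decidable (Spec_parse_frame_vars_py frame_text out) := by unfold Spec_parse_frame_vars_py; infer_instance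

-- ===== CLAIM (what is proved, stated in full; the proofs are below) =====
def Claim_equal_parse_frame_vars_py : Prop := ∀ (frame_text : String), Dom_parse_frame_vars_py frame_text → Spec_parse_frame_vars_py frame_text (parse_frame_vars_py frame_text)

-- ===== LEMMAS AND PROOFS =====

-- B's phase-2 evaluation of a segment list, and the 'current' marker it encodes
def pvEval (segs : List (String × List (List Char))) :
    PySem.Dict String String × PySem.Dict String String :=
  segs.foldl
    (fun (al : PySem.Dict String String × PySem.Dict String String) seg =>
      if seg.1 == "args" then (al.1.update (pvParseAssignments seg.2), al.2)
      else (al.1, al.2.update (pvParseAssignments seg.2)))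
    (PySem.Dict.empty, PySem.Dict.empty)

def pvCur (segs : List (String × List (List Char))) : Option String :=
  segs.getLast?.map (·.1)

def pvPhi (segs : List (String × List (List Char))) :
    PySem.Dict String String × PySem.Dict String String × Option String :=
  ((pvEval segs).1, (pvEval segs).2, pvCur segs)

theorem pvUpdate_nil (d : PySem.Dict String String) : d.update [] = d := rfl

theorem pvUpdate_concat (d : PySem.Dict String String) (xs : List (String × String)) (k v : String) :
    d.update (xs ++ [(k, v)]) = (d.update xs).insert k v := by
  simp [PySem.Dict.update]

theorem pvSegStep_tags (segs : List (String × List (List Char)))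
    (h : ∀ t ∈ segs, t.1 = "args" ∨ t.1 = "locals") (line : List Char) :
    ∀ t ∈ pvSegStep segs line, t.1 = "args" ∨ t.1 = "locals" := by
  intro x hx
  rw [pvSegStep] at hx
  split_ifs at hx with h1 h2 h3
  · rcases List.mem_append.1 hx with h' | h'
    · exact h _ h'
    · simp at h'; subst h'; left; rfl
  · rcases List.mem_append.1 hx with h' | h'
    · exact h _ h'
    · simp at h'; subst h'; right; rfl
  · exact h _ hx
  · rcases List.mem_append.1 hx with h' | h'
    · exact h _ (List.Sublist.subset (List.dropLast_sublist segs) h')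
    · have hne : segs ≠ [] := by simpa [List.isEmpty_iff] using h3
      have hmem : segs.getLast?.getD ("", []) ∈ segs := by
        rw [List.getLast?_eq_some_getLast hne]
        exact List.getLast_mem hne
      simp at h'
      rw [h']
      simpa using h _ hmem

theorem pvStepA_comm (segs : List (String × List (List Char)))
    (h : ∀ t ∈ segs, t.1 = "args" ∨ t.1 = "locals") (line : List Char) :
    pvPhi (pvSegStep segs line) = pvStepA (pvPhi segs) line := by
  rcases List.eq_nil_or_concat segs with rfl | ⟨init, lst, rfl⟩
  · by_cases h1 : PySem.Chars.isIn pvArgsMark (PySem.Chars.strip line)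
    · simp [pvSegStep, pvStepA, pvPhi, pvEval, pvCur, pvParseAssignments, pvUpdate_nil, h1]
    · by_cases h2 : PySem.Chars.isIn pvLocalsMark (PySem.Chars.strip line)
      · simp [pvSegStep, pvStepA, pvPhi, pvEval, pvCur, pvParseAssignments, pvUpdate_nil, h1, h2]
      · simp only [pvSegStep, pvStepA, pvPhi, pvEval, pvCur, h1, h2, if_false,
          List.isEmpty_nil, if_true, Bool.false_eq_true]
        split_ifs <;> simp_all
  · have ht := h lst (by simp)
    by_cases h1 : PySem.Chars.isIn pvArgsMark (PySem.Chars.strip line)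
    · rcases ht with ht | ht <;>
        simp [pvSegStep, pvStepA, pvPhi, pvEval, pvCur, pvParseAssignments, pvUpdate_nil,
          List.foldl_append, h1, ht]
    · by_cases h2 : PySem.Chars.isIn pvLocalsMark (PySem.Chars.strip line)
      · rcases ht with ht | ht <;>
          simp [pvSegStep, pvStepA, pvPhi, pvEval, pvCur, pvParseAssignments, pvUpdate_nil,
            List.foldl_append, h1, h2, ht]
      · by_cases h3 : (PySem.Chars.strip line).isEmpty
            || PySem.Chars.startswith (PySem.Chars.strip line) pvNoMark
        · have h3' : PySem.Chars.strip line = []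
              ∨ PySem.Chars.startswith (PySem.Chars.strip line) pvNoMark = true := by
            simpa [List.isEmpty_iff] using h3
          rcases ht with ht | ht <;>
            simp [pvSegStep, pvStepA, pvPhi, pvEval, pvCur, pvParseAssignments,
              List.foldl_append, h1, h2, h3, h3', ht]
        · have h3' : ¬(PySem.Chars.strip line = []
              ∨ PySem.Chars.startswith (PySem.Chars.strip line) pvNoMark = true) := by
            simpa [List.isEmpty_iff] using h3
          by_cases h4 : PySem.Chars.isIn pvEqSep (PySem.Chars.strip line)
          · rcases ht with ht | ht <;>
              simp [pvSegStep, pvStepA, pvPhi, pvEval, pvCur, pvParseAssignments,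
                pvUpdate_concat, List.foldl_append, h1, h2, h3, h3', h4, ht]
          · rcases ht with ht | ht <;>
              simp [pvSegStep, pvStepA, pvPhi, pvEval, pvCur, pvParseAssignments,
                List.foldl_append, h1, h2, h3, h3', h4, ht]

theorem pvFold_comm (lines : List (List Char)) (segs : List (String × List (List Char)))
    (h : ∀ t ∈ segs, t.1 = "args" ∨ t.1 = "locals") :
    pvPhi (lines.foldl pvSegStep segs) = lines.foldl pvStepA (pvPhi segs) := by
  induction lines generalizing segs with
  | nil => rfl
  | cons l ls ih =>
    simp only [List.foldl_cons]
    rw [ih _ (pvSegStep_tags segs h l), pvStepA_comm segs h l]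

-- ===== VERDICT (by name: the statement is the Claim_ definition above) =====
theorem parse_frame_vars_py_spec : Claim_equal_parse_frame_vars_py := by
  intro ft _
  unfold Spec_parse_frame_vars_py
  by_cases hft : ft == ""
  · have : ft = "" := by simpa using hft
    subst this
    decide
  · have hfold := pvFold_comm (PySem.Chars.splitOn ft.toList ['\n']) [] (by simp)
    simp only [parse_frame_vars_py, parse_frame_vars_py_alt, hft, if_false, Bool.false_eq_true]
    rw [show ((PySem.Dict.empty, PySem.Dict.empty, none) :
        PySem.Dict String String × PySem.Dict String String × Option String) = pvPhi [] from rfl,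
      ← hfold]
    rfl
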